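-- pv_equiv track=rewrite | github.com/pypi-data/pypi-mirror-138 | packages/move-jismeshcode/move_jismeshcode-0.0.5-py3-none-any.whl/move_jismeshcode/move.py | _moveYBelow9Iter
-- ===== SOURCE A (Python) =====
-- def _moveYBelow9Iter(num, add=1):
--   ykuriage = 0
--   if add > 0:
--     for i in range(add):
--       num, b = _moveYBelow9(num)
--       ykuriage += b
--   else:
--     for i in range(-add):
--       num, b = _moveYBelow9(num, False)
--       ykuriage += b
--   return num, ykuriage,
--
-- def _moveYBelow9(num, positive=True):
--   if num >= 3:
--     if positive:
--       return num - 2, 1 # 繰り上がり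
--     else:
--       return num - 2, 0
--   else:
--     if positive:
--       return num + 2, 0
--     else:
--       return num + 2, -1 # 繰り下がり
-- ===== SOURCE B (Python) =====
-- def _final_num(k, num):
--     # value after k applications of: num-2 if num >= 3 else num+2 (closed form)
--     if k == 0:
--         return num
--     if num >= 3:
--         t = (num - 1) // 2          # steps until the value drops below 3
--         if k <= t:
--             return num - 2 * k
--         r = k - t
--         base = num - 2 * t          # in {1, 2}; then period-2 cycle base <-> base+2
--         return base if r % 2 == 0 else base + 2
--     s = (4 - num) // 2              # steps until the value climbs to {3, 4}
--     if k <= s: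
--         return num + 2 * k
--     r = k - s
--     top = num + 2 * s               # in {3, 4}; then period-2 cycle top <-> top-2
--     return top if r % 2 == 0 else top - 2
--
-- def _moveYBelow9Iter(num, add=1):
--     k = add if add > 0 else -add
--     fin = _final_num(k, num)
--     # counting carries from the net displacement: k steps of +-2, carries = downs (resp. -ups)
--     if add > 0:
--         ykuriage = (k - (fin - num) // 2) // 2
--     else:
--         ykuriage = -((k + (fin - num) // 2) // 2)
--     return fin, ykuriage
-- ===== Notes on version B (the rewrite author's own statement) =====
-- stated objective: faster
-- what changed: Replaces the O(|add|) iteration of the digit-shift map by an O(1) closed form: compute the final value from the transient length plus the period-2 cycle, and recover the carry count arithmetically from the net displacement.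
import Mathlib
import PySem

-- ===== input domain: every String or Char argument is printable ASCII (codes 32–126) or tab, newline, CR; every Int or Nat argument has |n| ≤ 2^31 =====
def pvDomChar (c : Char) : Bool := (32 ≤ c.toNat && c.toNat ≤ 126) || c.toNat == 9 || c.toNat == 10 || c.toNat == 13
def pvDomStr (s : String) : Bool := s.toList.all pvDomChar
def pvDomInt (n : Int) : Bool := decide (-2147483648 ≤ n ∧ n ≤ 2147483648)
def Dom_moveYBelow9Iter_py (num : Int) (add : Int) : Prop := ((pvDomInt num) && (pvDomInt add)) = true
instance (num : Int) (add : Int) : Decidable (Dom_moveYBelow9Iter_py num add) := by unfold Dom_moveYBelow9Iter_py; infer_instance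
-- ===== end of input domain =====

-- B replaces A's O(|add|) step-by-step loop by an O(1) closed form: the step map has a
-- transient then a period-2 cycle, and the carry count is recovered from the net displacement.


-- ===== PORT A =====
-- _moveYBelow9
def moveYBelow9 (num : Int) (positive : Bool) : Int × Int :=
  if num ≥ 3 then
    if positive then (num - 2, 1) else (num - 2, 0)
  else
    if positive then (num + 2, 0) else (num + 2, -1)

-- the 'for i in range(add)' loop (positive branch), iterated as structural recursion on the count
def loopA : Nat → Int → Int → Bool → Int × Int
  | 0, num, y, _ => (num, y)
  | n + 1, num, y, pos =>
      let r := moveYBelow9 num pos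
      loopA n r.1 (y + r.2) pos

def moveYBelow9Iter_py (num : Int) (add : Int) : Int × Int :=
  if add > 0 then loopA add.toNat num 0 true
  else loopA (-add).toNat num 0 false

-- ===== PORT B =====
-- _final_num
def finalNum (k num : Int) : Int :=
  if k = 0 then num
  else if num ≥ 3 then
    let t := PySem.Int.floordiv (num - 1) 2
    if k ≤ t then num - 2 * k
    else
      let r := k - t
      let base := num - 2 * t
      if PySem.Int.mod r 2 = 0 then base else base + 2
  else
    let s := PySem.Int.floordiv (4 - num) 2
    if k ≤ s then num + 2 * k
    else
      let r := k - s
      let top := num + 2 * s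
      if PySem.Int.mod r 2 = 0 then top else top - 2

def moveYBelow9Iter_py_alt (num : Int) (add : Int) : Int × Int :=
  let k := if add > 0 then add else -add
  let fin := finalNum k num
  let y := if add > 0 then PySem.Int.floordiv (k - PySem.Int.floordiv (fin - num) 2) 2
           else -(PySem.Int.floordiv (k + PySem.Int.floordiv (fin - num) 2) 2)
  (fin, y)

-- ===== PRECONDITION & SPEC =====
def Spec_moveYBelow9Iter_py (num : Int) (add : Int) (out : Int × Int) : Prop := out = moveYBelow9Iter_py_alt num add
instance (num : Int) (add : Int) (out : Int × Int) : Decidable (Spec_moveYBelow9Iter_py num add out) := by unfold Spec_moveYBelow9Iter_py; infer_instance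

-- ===== CLAIM (what is proved, stated in full; the proofs are below) =====
def Claim_equal_moveYBelow9Iter_py : Prop := ∀ (num : Int) (add : Int), Dom_moveYBelow9Iter_py num add → Spec_moveYBelow9Iter_py num add (moveYBelow9Iter_py num add)

-- ===== LEMMAS AND PROOFS =====

-- the one-step map on num (same in both directions)
def stepN (x : Int) : Int := if x ≥ 3 then x - 2 else x + 2

theorem loopA_fst : ∀ (n : Nat) (num y : Int) (pos : Bool),
    (loopA n num y pos).1 = stepN^[n] num := by
  intro n
  induction n with
  | zero => intro num y pos; simp [loopA]
  | succ m ih =>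
      intro num y pos
      rw [Function.iterate_succ_apply]
      simp only [loopA, moveYBelow9, stepN]
      by_cases h : num ≥ 3 <;> cases pos <;> simp [h, ih]

theorem loopA_snd_pos : ∀ (n : Nat) (num y : Int),
    4 * ((loopA n num y true).2 - y) = 2 * n - ((loopA n num y true).1 - num) := by
  intro n
  induction n with
  | zero => intro num y; simp [loopA]
  | succ m ih =>
      intro num y
      simp only [loopA, moveYBelow9]
      by_cases h : num ≥ 3
      · simp only [h, if_pos]
        have h1 := ih (num - 2) (y + 1)
        have h2 : (loopA m (num - 2) (y + 1) true).1 = (loopA m (num - 2) (y + 1) true).1 := rfl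
        push_cast at h1 ⊢
        omega
      · simp only [h, if_false, if_true]
        have h1 := ih (num + 2) (y + 0)
        push_cast at h1 ⊢
        omega

theorem loopA_snd_neg : ∀ (n : Nat) (num y : Int),
    4 * ((loopA n num y false).2 - y) = -(2 * n) - ((loopA n num y false).1 - num) := by
  intro n
  induction n with
  | zero => intro num y; simp [loopA]
  | succ m ih =>
      intro num y
      simp only [loopA, moveYBelow9]
      by_cases h : num ≥ 3
      · simp only [h, if_pos]
        have h1 := ih (num - 2) (y + 0)
        push_cast at h1 ⊢
        omega
      · simp only [h, if_false]
        have h1 := ih (num + 2) (y + -1)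
        push_cast at h1 ⊢
        omega

theorem stepN_iterate_even : ∀ (n : Nat) (num : Int), 2 ∣ (stepN^[n] num - num) := by
  intro n
  induction n with
  | zero => intro num; simp
  | succ m ih =>
      intro num
      rw [Function.iterate_succ_apply]
      have := ih (stepN num)
      simp only [stepN] at this ⊢
      by_cases h : num ≥ 3 <;> simp [h] at this ⊢ <;> omega

theorem finalNum_succ (n : Nat) (num : Int) :
    finalNum ((n : Int) + 1) num = finalNum (n : Int) (stepN num) := by
  simp only [finalNum, stepN,
    PySem.Int.floordiv_eq_ediv_of_pos (by norm_num : (0:Int) < 2),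
    PySem.Int.mod_eq_emod_of_pos (by norm_num : (0:Int) < 2)]
  split_ifs <;> omega

theorem finalNum_iterate : ∀ (n : Nat) (num : Int), finalNum (n : Int) num = stepN^[n] num := by
  intro n
  induction n with
  | zero => intro num; simp [finalNum]
  | succ m ih =>
      intro num
      rw [Function.iterate_succ_apply]
      have h := finalNum_succ m num
      push_cast
      rw [h, ih]

-- ===== VERDICT (by name: the statement is the Claim_ definition above) =====
theorem moveYBelow9Iter_py_spec : Claim_equal_moveYBelow9Iter_py := by
  intro num add _
  unfold Spec_moveYBelow9Iter_py moveYBelow9Iter_py moveYBelow9Iter_py_alt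
  by_cases hpos : add > 0
  · simp only [hpos, if_pos]
    set n : Nat := add.toNat with hn
    have hcast : (n : Int) = add := by omega
    have hfst := loopA_fst n num 0 true
    have hsnd := loopA_snd_pos n num 0
    have hfin : finalNum add num = stepN^[n] num := by rw [← hcast]; exact finalNum_iterate n num
    have heven := stepN_iterate_even n num
    obtain ⟨d, hd⟩ := heven
    apply Prod.ext
    · simp only [hfst, hfin]
    · simp only [PySem.Int.floordiv_eq_ediv_of_pos (by norm_num : (0:Int) < 2)]
      simp only at hfst hsnd ⊢
      rw [hfin, hfst] at *
      omega
  · simp only [hpos, if_false]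
    set n : Nat := (-add).toNat with hn
    have hcast : (n : Int) = -add := by omega
    have hfst := loopA_fst n num 0 false
    have hsnd := loopA_snd_neg n num 0
    have hfin : finalNum (-add) num = stepN^[n] num := by rw [← hcast]; exact finalNum_iterate n num
    obtain ⟨d, hd⟩ := stepN_iterate_even n num
    apply Prod.ext
    · simp only [hfst, hfin]
    · simp only [PySem.Int.floordiv_eq_ediv_of_pos (by norm_num : (0:Int) < 2)]
      simp only at hfst hsnd ⊢
      rw [hfin, hfst] at *
      omega
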